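-- pv_equiv track=rewrite | github.com/ruchita-gokani/basic_probs | light_bulbs.py | how_many_bulbs_on
-- ===== SOURCE A (Python) =====
-- def how_many_bulbs_on(N):
--     fact = {}
--     on_bulbs = 0
--     for i in range(1,N+1):
--         for j in range(1,i+1):
--             if i%j == 0:
--                 if i in fact:
--                     fact[i].append(j)
--                 else:
--                     fact[i] = [j]
--
--         if len(fact[i]) % 2 == 1:
--             on_bulbs += 1
--     return on_bulbs
-- ===== SOURCE B (Python) =====
-- def how_many_bulbs_on(N):
--     # A bulb i ends up on iff i has an odd number of divisors, i.e. iff i is a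
--     # perfect square; count the perfect squares 1..N directly in one pass.
--     count = 0
--     for k in range(1, N + 1):
--         if k * k <= N:
--             count += 1
--     return count
-- ===== Notes on version B (the rewrite author's own statement) =====
-- stated objective: faster
-- what changed: B counts the perfect squares up to N directly (one pass testing k*k <= N) instead of building the full divisor list of every i in a dict and testing its length's parity.
import Mathlib
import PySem

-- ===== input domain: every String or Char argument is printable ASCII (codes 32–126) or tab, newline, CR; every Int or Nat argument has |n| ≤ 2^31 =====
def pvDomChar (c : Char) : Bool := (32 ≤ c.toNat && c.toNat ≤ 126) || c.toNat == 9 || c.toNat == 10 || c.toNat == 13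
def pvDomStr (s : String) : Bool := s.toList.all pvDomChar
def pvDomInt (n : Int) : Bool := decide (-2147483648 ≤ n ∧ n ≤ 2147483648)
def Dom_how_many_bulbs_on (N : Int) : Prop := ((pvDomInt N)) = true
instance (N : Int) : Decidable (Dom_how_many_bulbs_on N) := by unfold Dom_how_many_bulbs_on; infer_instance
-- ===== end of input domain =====

-- B counts the perfect squares up to N in a single pass (k*k ≤ N) instead of
-- building every i's divisor list in a dict and testing its length's parity.

-- ===== PORT A =====
-- inner loop body: for j in range(1, i+1): if i % j == 0: append j to fact[i] (create [j] if absent)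
def pvInnerStep (i : Int) (fact : PySem.Dict Int (List Int)) (j : Int) : PySem.Dict Int (List Int) :=
  if PySem.Int.mod i j == 0 then
    if fact.contains i then fact.modify i [] (fun l => l ++ [j])
    else fact.insert i [j]
  else fact

-- outer loop body: build fact[i], then on_bulbs += 1 when len(fact[i]) % 2 == 1
def pvOuterStep (st : PySem.Dict Int (List Int) × Int) (i : Int) : PySem.Dict Int (List Int) × Int :=
  let fact := (PySem.List.pyRange 1 (i + 1) 1).foldl (pvInnerStep i) st.1
  if PySem.Int.mod ((fact.getD i []).length : Int) 2 == 1 then (fact, st.2 + 1)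
  else (fact, st.2)

def how_many_bulbs_on (N : Int) : Int :=
  ((PySem.List.pyRange 1 (N + 1) 1).foldl pvOuterStep (PySem.Dict.empty, 0)).2

-- ===== PORT B =====
def how_many_bulbs_on_alt (N : Int) : Int :=
  (PySem.List.pyRange 1 (N + 1) 1).foldl
    (fun count k => if k * k ≤ N then count + 1 else count) 0

-- ===== PRECONDITION & SPEC =====
def Spec_how_many_bulbs_on (N : Int) (out : Int) : Prop := out = how_many_bulbs_on_alt N
instance (N : Int) (out : Int) : Decidable (Spec_how_many_bulbs_on N out) := by unfold Spec_how_many_bulbs_on; infer_instance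

-- ===== CLAIM (what is proved, stated in full; the proofs are below) =====
def Claim_equal_how_many_bulbs_on : Prop := ∀ (N : Int), Dom_how_many_bulbs_on N → Spec_how_many_bulbs_on N (how_many_bulbs_on N)

-- ===== LEMMAS AND PROOFS =====

-- the divisor test of the inner loop
def pvDv (i j : Int) : Bool := PySem.Int.mod i j == 0

-- the bulb-i-is-on test, as a pure predicate (what the dict entry's length amounts to)
def pvQ (i : Int) : Bool :=
  PySem.Int.mod ((((PySem.List.pyRange 1 (i + 1) 1).filter (pvDv i)).length : Int)) 2 == 1

-- the inner loop never touches keys other than i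
lemma inner_contains_ne (i : Int) :
    ∀ (js : List Int) (fact : PySem.Dict Int (List Int)) (k : Int), k ≠ i →
      ((js.foldl (pvInnerStep i) fact).contains k) = fact.contains k := by
  intro js
  induction js with
  | nil => intro fact k hk; rfl
  | cons j js ih =>
    intro fact k hk
    simp only [List.foldl_cons, pvInnerStep]
    split
    · split
      · rw [ih _ _ hk, PySem.Dict.contains_modify]
        simp [hk]
      · rw [ih _ _ hk, PySem.Dict.contains_insert]
        simp [hk]
    · exact ih _ _ hk

-- once the entry for i exists, the inner loop appends exactly the divisors it sees
lemma inner_getD_some (i : Int) :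
    ∀ (js : List Int) (fact : PySem.Dict Int (List Int)), fact.contains i = true →
      ((js.foldl (pvInnerStep i) fact).getD i []) = fact.getD i [] ++ js.filter (pvDv i) := by
  intro js
  induction js with
  | nil => intro fact _; simp
  | cons j js ih =>
    intro fact hc
    simp only [List.foldl_cons, pvInnerStep]
    by_cases hdv : pvDv i j
    · rw [if_pos (show (PySem.Int.mod i j == 0) = true from hdv), if_pos hc,
        ih _ (by rw [PySem.Dict.contains_modify]; simp),
        PySem.Dict.getD_modify_self, List.filter_cons_of_pos hdv]
      simp
    · rw [if_neg (show ¬ (PySem.Int.mod i j == 0) = true from hdv), ih _ hc,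
        List.filter_cons_of_neg hdv]

-- starting from no entry for i, the inner loop leaves exactly the divisors it sees
lemma inner_getD_none (i : Int) :
    ∀ (js : List Int) (fact : PySem.Dict Int (List Int)), fact.contains i = false →
      ((js.foldl (pvInnerStep i) fact).getD i []) = js.filter (pvDv i) := by
  intro js
  induction js with
  | nil =>
    intro fact hc
    simp [PySem.Dict.getD_of_not_contains (d := fact) (k := i), hc]
  | cons j js ih =>
    intro fact hc
    simp only [List.foldl_cons, pvInnerStep]
    by_cases hdv : pvDv i j
    · rw [if_pos (show (PySem.Int.mod i j == 0) = true from hdv), if_neg (by simp [hc]),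
        inner_getD_some i js _ (PySem.Dict.contains_insert_self _ _ _),
        PySem.Dict.getD_insert_self, List.filter_cons_of_pos hdv]
      simp
    · rw [if_neg (show ¬ (PySem.Int.mod i j == 0) = true from hdv), ih _ hc,
        List.filter_cons_of_neg hdv]

-- the outer loop counts pvQ, provided all keys still to be processed are absent
lemma outer_count :
    ∀ (len : Nat) (m : Int) (fact : PySem.Dict Int (List Int)) (acc : Int),
      (∀ k, m ≤ k → fact.contains k = false) →
      ((PySem.List.pyRange m (m + len) 1).foldl pvOuterStep (fact, acc)).2
        = acc + ((PySem.List.pyRange m (m + len) 1).countP pvQ : Int) := by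
  intro len
  induction len with
  | zero =>
    intro m fact acc _
    rw [PySem.List.pyRange_one_eq_nil (by omega)]
    simp
  | succ len ih =>
    intro m fact acc hinv
    rw [PySem.List.pyRange_one_cons (by omega)]
    simp only [List.foldl_cons, List.countP_cons]
    have hgetD : (((PySem.List.pyRange 1 (m + 1) 1).foldl (pvInnerStep m) fact).getD m [])
        = (PySem.List.pyRange 1 (m + 1) 1).filter (pvDv m) :=
      inner_getD_none m _ fact (hinv m le_rfl)
    have hinv' : ∀ k, m + 1 ≤ k →
        (((PySem.List.pyRange 1 (m + 1) 1).foldl (pvInnerStep m) fact).contains k) = false := by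
      intro k hk
      rw [inner_contains_ne m _ fact k (by omega)]
      exact hinv k (by omega)
    have harith : m + ((len + 1 : Nat) : Int) = m + 1 + ((len : Nat) : Int) := by
      push_cast; ring
    simp only [pvOuterStep, hgetD]
    by_cases hq : pvQ m
    · rw [if_pos (show (PySem.Int.mod
          ((((PySem.List.pyRange 1 (m + 1) 1).filter (pvDv m)).length : Int)) 2 == 1) = true
          from hq), harith,
        ih (m + 1) ((PySem.List.pyRange 1 (m + 1) 1).foldl (pvInnerStep m) fact) (acc + 1) hinv']
      simp only [hq, if_true]
      push_cast
      ring
    · rw [if_neg (show ¬ (PySem.Int.mod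
          ((((PySem.List.pyRange 1 (m + 1) 1).filter (pvDv m)).length : Int)) 2 == 1) = true
          from hq), harith,
        ih (m + 1) ((PySem.List.pyRange 1 (m + 1) 1).foldl (pvInnerStep m) fact) acc hinv']
      simp only [hq]
      push_cast
      ring

-- the B-side fold is a count
lemma alt_count (N : Int) :
    ∀ (l : List Int) (c : Int),
      l.foldl (fun count k => if k * k ≤ N then count + 1 else count) c
        = c + (l.countP (fun k => decide (k * k ≤ N)) : Int) := by
  intro l
  induction l with
  | nil => intro c; simp
  | cons k l ih =>
    intro c
    simp only [List.foldl_cons, List.countP_cons]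
    by_cases h : k * k ≤ N
    · rw [if_pos h, ih]; simp [h]; ring
    · rw [if_neg h, ih]; simp [h]

-- counting k < n with k+1 ≤ s
lemma countP_le_range : ∀ (n s : Nat),
    (List.range n).countP (fun k => decide (k + 1 ≤ s)) = min s n := by
  intro n
  induction n with
  | zero => intro s; simp
  | succ n ih =>
    intro s
    rw [List.range_succ, List.countP_append, ih]
    have hone : (List.countP (fun k => decide (k + 1 ≤ s)) [n]) = if n + 1 ≤ s then 1 else 0 := by
      by_cases h : n + 1 ≤ s <;> simp [h] <;> omega
    rw [hone]
    by_cases h : n + 1 ≤ s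
    · rw [if_pos h]; omega
    · rw [if_neg h]; omega

-- one step of Nat.sqrt
lemma sqrt_step (n : ℕ) :
    Nat.sqrt (n + 1) = if Nat.sqrt (n + 1) * Nat.sqrt (n + 1) = n + 1
      then Nat.sqrt n + 1 else Nat.sqrt n := by
  have h1 : Nat.sqrt n ≤ Nat.sqrt (n + 1) := Nat.sqrt_le_sqrt (by omega)
  have h2 : Nat.sqrt (n + 1) ≤ Nat.sqrt n + 1 := Nat.sqrt_succ_le_succ_sqrt n
  have h3 := Nat.sqrt_le n
  have h5 := Nat.sqrt_le (n + 1)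
  have h6 := Nat.succ_le_succ_sqrt n
  split
  · next hsq =>
    have hlt : Nat.sqrt n < Nat.sqrt (n + 1) := by
      by_contra hle
      rw [Nat.not_lt] at hle
      have hmul := Nat.mul_le_mul hle hle
      have hc := le_trans hmul h3
      rw [hsq] at hc
      omega
    omega
  · next hsq =>
    by_contra hne
    have heq : Nat.sqrt (n + 1) = Nat.sqrt n + 1 := by omega
    rw [heq] at hsq h5
    exact hsq (le_antisymm h5 h6)

-- counting the perfect squares among 1..n
lemma countP_sq : ∀ n : Nat,
    (List.range n).countP (fun k => decide (Nat.sqrt (k + 1) * Nat.sqrt (k + 1) = k + 1))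
      = Nat.sqrt n := by
  intro n
  induction n with
  | zero => simp
  | succ n ih =>
    rw [List.range_succ, List.countP_append, ih, sqrt_step n]
    by_cases h : Nat.sqrt (n + 1) * Nat.sqrt (n + 1) = n + 1
    · simp [h]
    · simp [h]

-- the divisor count of m as a Finset card
lemma divisor_count (m : Nat) :
    (List.range m).countP (fun t => decide ((1 + t) ∣ m)) = m.divisors.card := by
  rw [Nat.divisors]
  rw [Nat.Ico_eq_range']
  simp only [Nat.add_sub_cancel]
  rw [Finset.filter]
  simp only [Finset.card_mk, Multiset.filter_coe, Multiset.coe_card]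
  rw [← List.countP_eq_length_filter, List.range'_eq_map_range, List.countP_map]
  rfl

-- the exponents of a square are even, and conversely
lemma even_fact_iff_sq {m : ℕ} (hm : m ≠ 0) :
    (∀ p ∈ m.primeFactors, Even (m.factorization p)) ↔ Nat.sqrt m * Nat.sqrt m = m := by
  constructor
  · intro h
    rw [← Nat.exists_mul_self]
    refine ⟨(m.factorization).prod fun p e => p ^ (e / 2), ?_⟩
    have hprod : ∀ p ∈ (m.factorization).support,
        p ^ (m.factorization p / 2) * p ^ (m.factorization p / 2) = p ^ (m.factorization p) := by
      intro p hp
      rw [← pow_add]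
      congr 1
      obtain ⟨r, hr⟩ := h p (by simpa using hp)
      omega
    rw [Finsupp.prod, ← Finset.prod_mul_distrib, Finset.prod_congr rfl hprod]
    exact Nat.prod_factorization_pow_eq_self hm
  · intro h p hp
    obtain ⟨r, hr⟩ : ∃ r, r * r = m := ⟨_, h⟩
    have hr0 : r ≠ 0 := by
      rintro rfl
      simp at hr
      exact hm hr.symm
    have hf : m.factorization = r.factorization + r.factorization := by
      rw [← hr, Nat.factorization_mul hr0 hr0]
    rw [hf]
    exact ⟨r.factorization p, by simp⟩

-- parity of the divisor count detects squares
lemma odd_card_divisors {m : ℕ} (hm : m ≠ 0) :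
    (m.divisors.card % 2 = 1) ↔ Nat.sqrt m * Nat.sqrt m = m := by
  rw [← Nat.odd_iff, Nat.card_divisors hm, ← even_fact_iff_sq hm, ← Nat.not_even_iff_odd,
    even_iff_two_dvd, Prime.dvd_finset_prod_iff Nat.prime_two.prime]
  constructor
  · intro h p hp
    by_contra hodd
    exact h ⟨p, hp, by rw [← even_iff_two_dvd, Nat.even_add_one]; exact hodd⟩
  · rintro h ⟨p, hp, hdvd⟩
    rw [← even_iff_two_dvd, Nat.even_add_one] at hdvd
    exact hdvd (h p hp)

-- pvQ on positive integers is the perfect-square test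
lemma pvQ_eq (k : Nat) :
    pvQ (1 + (k : Int)) = decide (Nat.sqrt (k + 1) * Nat.sqrt (k + 1) = k + 1) := by
  have hdv : ∀ t : Nat, pvDv (1 + (k : Int)) (1 + (t : Int)) = decide ((1 + t) ∣ (k + 1)) := by
    intro t
    rw [pvDv, show (1 + (k : Int)) = ((k + 1 : Nat) : Int) from by push_cast; ring,
      show (1 + (t : Int)) = ((t + 1 : Nat) : Int) from by push_cast; ring,
      PySem.Int.mod_natCast]
    rw [Bool.eq_iff_iff]
    simp only [beq_iff_eq, decide_eq_true_eq, Int.natCast_eq_zero]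
    rw [Nat.add_comm 1 t]
    exact Nat.dvd_iff_mod_eq_zero.symm
  rw [pvQ, PySem.List.pyRange_one,
    show ((1 : Int) + (k : Nat) + 1 - 1).toNat = k + 1 from by omega,
    List.filter_map, List.length_map, ← List.countP_eq_length_filter]
  have hc : (List.range (k + 1)).countP ((pvDv (1 + (k : Int))) ∘ (fun t : Nat => (1 : Int) + t))
      = (k + 1).divisors.card := by
    have hcongr : (List.range (k + 1)).countP ((pvDv (1 + (k : Int))) ∘ (fun t : Nat => (1 : Int) + t))
        = (List.range (k + 1)).countP (fun t : Nat => decide ((1 + t) ∣ (k + 1))) :=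
      List.countP_congr (fun t _ => by simp only [Function.comp_apply, hdv t])
    rw [hcongr]
    exact divisor_count (k + 1)
  rw [hc]
  have hmod : PySem.Int.mod (((k + 1).divisors.card : Nat) : Int) 2
      = ((((k + 1).divisors.card % 2 : Nat) : Nat) : Int) := by
    exact_mod_cast PySem.Int.mod_natCast ((k + 1).divisors.card) 2
  rw [hmod, Bool.eq_iff_iff]
  simp only [beq_iff_eq, decide_eq_true_eq]
  rw [show ((1 : Int)) = (((1 : Nat) : Nat) : Int) from rfl, Int.natCast_inj]
  exact odd_card_divisors (by omega)

-- B's predicate on positive integers, against a Nat bound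
lemma alt_pred_eq (n k : Nat) :
    (decide ((1 + (k : Int)) * (1 + (k : Int)) ≤ (n : Int)))
      = decide (k + 1 ≤ Nat.sqrt n) := by
  rw [decide_eq_decide]
  rw [show (1 + (k : Int)) * (1 + (k : Int)) = (((k + 1) * (k + 1) : Nat) : Int) from by
    push_cast; ring]
  rw [Int.ofNat_le, Nat.le_sqrt]

-- A's loop, counted and evaluated: the number of squares 1..n
lemma A_count (n : Nat) :
    ((PySem.List.pyRange 1 ((n : Int) + 1) 1).countP pvQ) = Nat.sqrt n := by
  rw [PySem.List.pyRange_one, show ((n : Int) + 1 - 1).toNat = n from by omega, List.countP_map]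
  have hcongr : (List.range n).countP (pvQ ∘ (fun t : Nat => (1 : Int) + t))
      = (List.range n).countP
          (fun t : Nat => decide (Nat.sqrt (t + 1) * Nat.sqrt (t + 1) = t + 1)) :=
    List.countP_congr (fun t _ => by simp only [Function.comp_apply, pvQ_eq t])
  rw [hcongr]
  exact countP_sq n

-- B's loop evaluated: the same count
lemma B_count (n : Nat) : how_many_bulbs_on_alt (n : Int) = (Nat.sqrt n : Int) := by
  rw [how_many_bulbs_on_alt, alt_count, PySem.List.pyRange_one,
    show ((n : Int) + 1 - 1).toNat = n from by omega, List.countP_map]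
  have hcongr : (List.range n).countP ((fun j : Int => decide (j * j ≤ (n : Int)))
        ∘ (fun t : Nat => (1 : Int) + t))
      = (List.range n).countP (fun t : Nat => decide (t + 1 ≤ Nat.sqrt n)) :=
    List.countP_congr (fun t _ => by simp only [Function.comp_apply, alt_pred_eq n t])
  rw [hcongr, countP_le_range, min_eq_left (Nat.sqrt_le_self n)]
  simp

-- ===== VERDICT (by name: the statement is the Claim_ definition above) =====
theorem how_many_bulbs_on_spec : Claim_equal_how_many_bulbs_on := by
  unfold Claim_equal_how_many_bulbs_on
  intro N _
  unfold Spec_how_many_bulbs_on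
  rcases lt_or_ge N 0 with hN | hN
  · rw [how_many_bulbs_on, how_many_bulbs_on_alt, PySem.List.pyRange_one_eq_nil (by omega)]
    rfl
  · obtain ⟨n, rfl⟩ : ∃ n : Nat, N = (n : Int) := ⟨N.toNat, by omega⟩
    have hA := outer_count n 1 PySem.Dict.empty 0 (fun k _ => by simp)
    rw [show (1 : Int) + (n : Nat) = ((n : Nat) : Int) + 1 from by ring] at hA
    rw [how_many_bulbs_on, hA, A_count, B_count]
    simp
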